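-- pv_equiv track=rewrite | github.com/t34-dev/youtube-download-speed-test | video_format_utils.py | select_best_format
-- ===== SOURCE A (Python) =====
-- def select_best_format(codecs, resolution):
--     # Priority order for codecs
--     codec_priority = ['av01', 'vp09', 'avc1']
--
--     # Find the highest priority codec from the input list
--     selected_codec = None
--     for priority_codec in codec_priority:
--         for codec in codecs:
--             if priority_codec in codec.lower():
--                 selected_codec = codec
--                 break
--         if selected_codec:
--             break
--
--     # If no preferred codec found, select the first one
--     if not selected_codec and codecs:
--         selected_codec = codecs[0]
--
--     # Determine the best format
--     if selected_codec:
--         format = get_optimal_format(selected_codec, resolution)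
--         return format, selected_codec
--     else:
--         return None, None  # Return None if no codec found
--
-- def get_optimal_format(codec, resolution):
--     # Normalize input data
--     codec = codec.lower()
--     resolution = resolution.lower()
--
--     # Dictionary mapping codecs to their preferred formats
--     codec_format_map = {
--         'av01': 'mp4',
--         'avc1': 'mp4',
--         'vp09': 'webm',
--         'mp4a': 'mp4',
--     }
--
--     # Special cases
--     if 'avc1' in codec and resolution in ['360p', '480p']:
--         return 'mp4'
--
--     # Look for the codec in the dictionary
--     for key in codec_format_map:
--         if key in codec:
--             return codec_format_map[key]
--
--     # If codec not found, return mp4 as the most universal format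
--     return 'mp4'
-- ===== SOURCE B (Python) =====
-- # B: rank each codec by the index of the first priority token it contains,
-- # then pick the first minimum with min(); same helper get_optimal_format.
--
-- _PRIORITY = ['av01', 'vp09', 'avc1']
--
--
-- def _rank(codec):
--     cl = codec.lower()
--     for i, token in enumerate(_PRIORITY):
--         if token in cl:
--             return i
--     return len(_PRIORITY)
--
--
-- def get_optimal_format(codec, resolution):
--     codec = codec.lower()
--     resolution = resolution.lower()
--     codec_format_map = {
--         'av01': 'mp4',
--         'avc1': 'mp4',
--         'vp09': 'webm',
--         'mp4a': 'mp4',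
--     }
--     if 'avc1' in codec and resolution in ['360p', '480p']:
--         return 'mp4'
--     for key in codec_format_map:
--         if key in codec:
--             return codec_format_map[key]
--     return 'mp4'
--
--
-- def select_best_format(codecs, resolution):
--     best = min(codecs, key=_rank) if codecs else None
--     if not best:
--         return None, None
--     return get_optimal_format(best, resolution), best
-- ===== Notes on version B (the rewrite author's own statement) =====
-- stated objective: alternative
-- what changed: Replaces A's priority-outer nested scan (one pass over codecs per priority token, with break/fallback) by a per-codec rank function (index of the first priority token contained, else 3) and a single first-minimum min(codecs, key=rank) pass; min's first-minimum stability reproduces A's tie-breaking and the codecs[0] fallback.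
import Mathlib
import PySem

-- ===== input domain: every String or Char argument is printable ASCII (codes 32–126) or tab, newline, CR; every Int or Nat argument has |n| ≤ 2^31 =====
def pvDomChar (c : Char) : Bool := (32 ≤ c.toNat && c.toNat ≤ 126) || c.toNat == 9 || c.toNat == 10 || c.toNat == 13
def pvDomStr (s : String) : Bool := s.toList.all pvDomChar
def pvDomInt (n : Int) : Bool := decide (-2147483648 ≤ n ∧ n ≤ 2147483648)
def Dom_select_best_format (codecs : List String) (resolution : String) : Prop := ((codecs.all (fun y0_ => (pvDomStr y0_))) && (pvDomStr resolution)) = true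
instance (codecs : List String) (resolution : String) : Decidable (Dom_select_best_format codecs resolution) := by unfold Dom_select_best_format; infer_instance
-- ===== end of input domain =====

-- B replaces A's priority-outer nested scan by a per-codec rank plus a single
-- first-minimum pass (min with key); same return value everywhere (alternative decomposition).

-- ===== PORT A =====

-- shared helper of the module, used verbatim by A and by B
def gofLoop (codec : String) : List (String × String) → String
  | [] => "mp4"
  | (k, v) :: rest => if PySem.Str.isIn k codec then v else gofLoop codec rest

def get_optimal_format (codec : String) (resolution : String) : String :=
  let codec := PySem.Str.lower codec
  let resolution := PySem.Str.lower resolution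
  if PySem.Str.isIn "avc1" codec && (resolution == "360p" || resolution == "480p") then "mp4"
  else gofLoop codec [("av01", "mp4"), ("avc1", "mp4"), ("vp09", "webm"), ("mp4a", "mp4")]

-- Python truthiness of selected_codec (None and "" are falsy)
def pyTruthyStr : Option String → Bool
  | none => false
  | some s => s ≠ ""

-- inner 'for codec in codecs: … break'
def sbfInner (pc : String) : List String → Option String
  | [] => none
  | c :: rest => if PySem.Str.isIn pc (PySem.Str.lower c) then some c else sbfInner pc rest

-- outer 'for priority_codec in codec_priority: … if selected_codec: break'
def sbfOuter (codecs : List String) (sel : Option String) : List String → Option String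
  | [] => sel
  | p :: ps =>
      let sel' := match sbfInner p codecs with
        | some c => some c
        | none => sel
      if pyTruthyStr sel' then sel' else sbfOuter codecs sel' ps

def select_best_format (codecs : List String) (resolution : String) : Option String × Option String :=
  let sel := sbfOuter codecs none ["av01", "vp09", "avc1"]
  -- 'if not selected_codec and codecs: selected_codec = codecs[0]' (guarded by nonemptiness, so head? = some codecs[0])
  let sel := if !pyTruthyStr sel && !codecs.isEmpty then codecs.head? else sel
  if pyTruthyStr sel then
    match sel with
    | some s => (some (get_optimal_format s resolution), some s)
    | none => (none, none)   -- unreachable: truthy implies some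
  else (none, none)

-- ===== PORT B =====

-- _rank: index of first priority token contained in codec.lower(), else len(priority) = 3
def rankLoop (cl : String) : List (Int × String) → Int
  | [] => 3
  | (i, t) :: rest => if PySem.Str.isIn t cl then i else rankLoop cl rest

def rankB (codec : String) : Int :=
  rankLoop (PySem.Str.lower codec) (PySem.List.enumerate ["av01", "vp09", "avc1"])

def select_best_format_alt (codecs : List String) (resolution : String) : Option String × Option String :=
  let best := if codecs.isEmpty then none else PySem.List.min? codecs rankB
  match best with
  | none => (none, none)
  | some b => if b ≠ "" then (some (get_optimal_format b resolution), some b) else (none, none)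

-- ===== PRECONDITION & SPEC =====
def Spec_select_best_format (codecs : List String) (resolution : String) (out : Option String × Option String) : Prop := out = select_best_format_alt codecs resolution
instance (codecs : List String) (resolution : String) (out : Option String × Option String) : Decidable (Spec_select_best_format codecs resolution out) := by unfold Spec_select_best_format; infer_instance

-- ===== CLAIM (what is proved, stated in full; the proofs are below) =====
def Claim_equal_select_best_format : Prop := ∀ (codecs : List String) (resolution : String), Dom_select_best_format codecs resolution → Spec_select_best_format codecs resolution (select_best_format codecs resolution)

-- ===== LEMMAS AND PROOFS =====

def pA (c : String) : Bool := PySem.Str.isIn "av01" (PySem.Str.lower c)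
def pV (c : String) : Bool := PySem.Str.isIn "vp09" (PySem.Str.lower c)
def pC (c : String) : Bool := PySem.Str.isIn "avc1" (PySem.Str.lower c)

def rk (c : String) : Int := if pA c then 0 else if pV c then 1 else if pC c then 2 else 3


-- first-argmin with running best (what min?'s fold computes)
def fam (b : String) : List String → String
  | [] => b
  | x :: l => fam (if rk x < rk b then x else b) l

-- the priority cascade A performs
def casc (b : String) (l : List String) : String :=
  match List.find? pA (b :: l) with
  | some x => x
  | none =>
    match List.find? pV (b :: l) with
    | some x => x
    | none =>
      match List.find? pC (b :: l) with
      | some x => x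
      | none => b

theorem rankB_eq (c : String) : rankB c = rk c := by
  have he : PySem.List.enumerate ["av01", "vp09", "avc1"] =
      [(0, "av01"), (1, "vp09"), (2, "avc1")] := by decide
  simp only [rankB, he, rankLoop, rk, pA, pV, pC]
  rfl

theorem min?_eq_fam (l : List String) (b : String) :
    PySem.List.min? (b :: l) rankB = some (fam b l) := by
  induction l generalizing b with
  | nil => rfl
  | cons x xs ih =>
    have step : PySem.List.min? (b :: x :: xs) rankB =
        PySem.List.min? ((if rk x < rk b then x else b) :: xs) rankB := by
      simp only [PySem.List.min?, List.foldl]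
      by_cases h : rk x < rk b <;> simp [rankB_eq, h]
    rw [step, ih, fam]

theorem collapse (b x : String) (l : List String) :
    casc b (x :: l) = casc (if rk x < rk b then x else b) l := by
  by_cases hab : pA b = true <;> by_cases hax : pA x = true <;>
    by_cases hvb : pV b = true <;> by_cases hvx : pV x = true <;>
      by_cases hcb : pC b = true <;> by_cases hcx : pC x = true <;>
        · simp only [rk, hab, hax, hvb, hvx, hcb, hcx, casc, List.find?]
          simp_all

theorem casc_eq_fam (l : List String) (b : String) : casc b l = fam b l := by
  induction l generalizing b with
  | nil =>
    cases hpA : pA b <;> cases hpV : pV b <;> cases hpC : pC b <;>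
      simp [casc, fam, List.find?, hpA, hpV, hpC]
  | cons x xs ih => rw [collapse, fam]; exact ih _

theorem inner_pA (l : List String) : sbfInner "av01" l = List.find? pA l := by
  induction l with
  | nil => rfl
  | cons c rest ih =>
    simp only [sbfInner, List.find?, ih, pA]
    cases PySem.Str.isIn "av01" (PySem.Str.lower c) <;> rfl

theorem inner_pV (l : List String) : sbfInner "vp09" l = List.find? pV l := by
  induction l with
  | nil => rfl
  | cons c rest ih =>
    simp only [sbfInner, List.find?, ih, pV]
    cases PySem.Str.isIn "vp09" (PySem.Str.lower c) <;> rfl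

theorem inner_pC (l : List String) : sbfInner "avc1" l = List.find? pC l := by
  induction l with
  | nil => rfl
  | cons c rest ih =>
    simp only [sbfInner, List.find?, ih, pC]
    cases PySem.Str.isIn "avc1" (PySem.Str.lower c) <;> rfl

theorem ne_empty_of_pA {c : String} (h : pA c = true) : c ≠ "" := by
  rintro rfl; revert h; decide

theorem ne_empty_of_pV {c : String} (h : pV c = true) : c ≠ "" := by
  rintro rfl; revert h; decide

theorem ne_empty_of_pC {c : String} (h : pC c = true) : c ≠ "" := by
  rintro rfl; revert h; decide

-- A's selection loop as the three find? passes
theorem outer_eq (codecs : List String) :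
    sbfOuter codecs none ["av01", "vp09", "avc1"] =
      match List.find? pA codecs with
      | some c => some c
      | none =>
        match List.find? pV codecs with
        | some c => some c
        | none => List.find? pC codecs := by
  simp only [sbfOuter, inner_pA, inner_pV, inner_pC]
  cases hA : List.find? pA codecs with
  | some c =>
    have hc : c ≠ "" := ne_empty_of_pA (List.find?_some hA)
    simp [pyTruthyStr, hc]
  | none =>
    cases hV : List.find? pV codecs with
    | some c =>
      have hc : c ≠ "" := ne_empty_of_pV (List.find?_some hV)
      simp [pyTruthyStr, hc]
    | none =>
      cases hC : List.find? pC codecs with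
      | some c =>
        have hc : c ≠ "" := ne_empty_of_pC (List.find?_some hC)
        simp [pyTruthyStr, hc]
      | none => simp [pyTruthyStr]

-- ===== VERDICT (by name: the statement is the Claim_ definition above) =====
theorem select_best_format_spec : Claim_equal_select_best_format := by
  intro codecs resolution _
  unfold Spec_select_best_format
  cases codecs with
  | nil => rfl
  | cons c cs =>
    have hsel : select_best_format (c :: cs) resolution =
        (if casc c cs ≠ "" then
          (some (get_optimal_format (casc c cs) resolution), some (casc c cs))
        else (none, none)) := by
      unfold select_best_format
      rw [outer_eq]
      cases hA : List.find? pA (c :: cs) with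
      | some y =>
        have hy : y ≠ "" := ne_empty_of_pA (List.find?_some hA)
        simp [casc, hA, pyTruthyStr, hy]
      | none =>
        cases hV : List.find? pV (c :: cs) with
        | some y =>
          have hy : y ≠ "" := ne_empty_of_pV (List.find?_some hV)
          simp [casc, hA, hV, pyTruthyStr, hy]
        | none =>
          cases hC : List.find? pC (c :: cs) with
          | some y =>
            have hy : y ≠ "" := ne_empty_of_pC (List.find?_some hC)
            simp [casc, hA, hV, hC, pyTruthyStr, hy]
          | none =>
            by_cases hc : c = ""
            · subst hc; simp [casc, hA, hV, hC, pyTruthyStr]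
            · simp [casc, hA, hV, hC, pyTruthyStr, hc, List.head?]
    rw [hsel]
    simp [select_best_format_alt, min?_eq_fam, casc_eq_fam]
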